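-- pv_equiv track=rewrite | github.com/klynicol/frozenza | scripts/extract_frozen_pizza_brands.py | dedupe_by_brand
-- ===== SOURCE A (Python) =====
-- def dedupe_by_brand(results: list[dict]) -> list[dict]:
--     """Keep one row per brand_name: the one with highest confidence_score."""
--     by_brand: dict[str, dict] = {}
--     for r in results:
--         name = (r.get("brand_name") or "").strip()
--         if not name:
--             continue
--         score = int(r.get("confidence_score") or 0)
--         if name not in by_brand or score > int(by_brand[name].get("confidence_score") or 0):
--             by_brand[name] = r
--     return list(by_brand.values())
-- ===== SOURCE B (Python) =====
-- def dedupe_by_brand(results: list[dict]) -> list[dict]: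
--     """Keep one row per brand_name: the one with highest confidence_score."""
--     by_brand: dict[str, list[dict]] = {}
--     for r in results:
--         name = (r.get("brand_name") or "").strip()
--         if name:
--             by_brand.setdefault(name, []).append(r)
--     return [max(rows, key=lambda r: int(r.get("confidence_score") or 0))
--             for rows in by_brand.values()]
-- ===== Notes on version B (the rewrite author's own statement) =====
-- stated objective: alternative
-- what changed: Replaces the fused single-pass running-best-per-brand update with a two-phase collect-then-reduce: first group all rows by stripped brand name in insertion order, then pick the first-maximal row of each group with max(key=score).
import Mathlib
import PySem

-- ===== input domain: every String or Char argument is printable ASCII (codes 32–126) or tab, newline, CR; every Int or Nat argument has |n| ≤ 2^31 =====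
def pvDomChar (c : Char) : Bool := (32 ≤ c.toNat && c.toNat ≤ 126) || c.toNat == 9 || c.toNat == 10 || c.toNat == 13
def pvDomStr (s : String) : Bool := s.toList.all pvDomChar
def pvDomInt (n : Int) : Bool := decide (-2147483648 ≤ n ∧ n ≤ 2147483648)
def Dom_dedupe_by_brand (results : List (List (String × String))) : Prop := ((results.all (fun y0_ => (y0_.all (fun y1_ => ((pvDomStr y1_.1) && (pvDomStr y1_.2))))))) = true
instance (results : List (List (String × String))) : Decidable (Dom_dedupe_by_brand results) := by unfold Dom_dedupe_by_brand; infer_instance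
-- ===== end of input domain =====

-- B replaces A's fused running-best-per-brand scan by a two-phase group-then-reduce
-- (collect all rows per brand, then take the first-maximal row of each group); same cost, alternative structure.

-- shared helpers: the row accessors both Pythons use verbatim
-- name = (r.get("brand_name") or "").strip()
def pvName (r : List (String × String)) : String :=
  PySem.Str.strip (((PySem.Dict.mk r).get? "brand_name").getD "")

-- int(r.get("confidence_score") or 0); total stand-in: parse failure (where Python raises, excluded by Pre_) gives 0
def pvScore (r : List (String × String)) : Int :=
  match (PySem.Dict.mk r).get? "confidence_score" with
  | none => 0
  | some s => if s = "" then 0 else (PySem.Int.ofStr? s).getD 0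

-- ===== PORT A =====
def dedupe_by_brand (results : List (List (String × String))) : List (List (String × String)) :=
  (results.foldl
    (fun (d : PySem.Dict String (List (String × String))) r =>
      let name := pvName r
      if name = "" then d
      else if d.contains name = false ∨ pvScore r > pvScore (d.getD name []) then d.insert name r
      else d)
    PySem.Dict.empty).values

-- ===== PORT B =====
def dedupe_by_brand_alt (results : List (List (String × String))) : List (List (String × String)) :=
  let by_brand : PySem.Dict String (List (List (String × String))) :=
    results.foldl
      (fun g r =>
        let name := pvName r
        if name = "" then g else g.modify name [] (· ++ [r]))
      PySem.Dict.empty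
  by_brand.values.map (fun rows => (PySem.List.max? rows pvScore).getD [])

-- ===== PRECONDITION & SPEC =====
-- Python's int() raises ValueError on a non-integer confidence_score string; Pre_ admits exactly
-- the inputs where every row with a nonempty stripped brand_name has a parseable (or empty/absent) score.
def pvScoreOk (r : List (String × String)) : Bool :=
  match (PySem.Dict.mk r).get? "confidence_score" with
  | none => true
  | some s => s == "" || (PySem.Int.ofStr? s).isSome

def Pre_dedupe_by_brand (results : List (List (String × String))) : Prop :=
  ∀ r ∈ results, pvName r ≠ "" → pvScoreOk r = true
instance (results : List (List (String × String))) : Decidable (Pre_dedupe_by_brand results) := by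
  unfold Pre_dedupe_by_brand; infer_instance

def pvWitness_dedupe_by_brand : (List (List (String × String))) :=
  [[("brand_name", "acme"), ("confidence_score", "3")],
   [("brand_name", " acme "), ("confidence_score", "7")],
   [("brand_name", "zeta")]]

def Spec_dedupe_by_brand (results : List (List (String × String))) (out : List (List (String × String))) : Prop := out = dedupe_by_brand_alt results
instance (results : List (List (String × String))) (out : List (List (String × String))) : Decidable (Spec_dedupe_by_brand results out) := by unfold Spec_dedupe_by_brand; infer_instance

-- ===== CLAIM (what is proved, stated in full; the proofs are below) =====
def Claim_equal_dedupe_by_brand : Prop := ∀ (results : List (List (String × String))), Dom_dedupe_by_brand results → Pre_dedupe_by_brand results → Spec_dedupe_by_brand results (dedupe_by_brand results)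

-- ===== LEMMAS AND PROOFS =====

-- the reduce step of B: first-maximal row of a group
def pvPick (rows : List (List (String × String))) : List (String × String) :=
  (PySem.List.max? rows pvScore).getD []

lemma pvPick_append_singleton (rows : List (List (String × String))) (hrows : rows ≠ [])
    (r : List (String × String)) :
    pvPick (rows ++ [r]) = if pvScore (pvPick rows) < pvScore r then r else pvPick rows := by
  obtain ⟨m, hm⟩ : ∃ m, PySem.List.max? rows pvScore = some m := by
    rcases h : PySem.List.max? rows pvScore with _ | m
    · exact absurd ((PySem.List.max?_eq_none_iff _ _).1 h) hrows
    · exact ⟨m, rfl⟩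
  simp only [pvPick, PySem.List.max?] at hm ⊢
  rw [List.foldl_append, hm]
  by_cases hlt : pvScore m < pvScore r <;> simp [hlt]

-- the loop invariant tying A's dict to B's groups dict
def pvInv (d : PySem.Dict String (List (String × String)))
    (g : PySem.Dict String (List (List (String × String)))) : Prop :=
  d.items = g.items.map (fun p => (p.1, pvPick p.2)) ∧ g.keys.Nodup ∧ ∀ p ∈ g.items, p.2 ≠ []

lemma pvInv_keys {d g} (h : pvInv d g) : d.keys = g.keys := by
  simp [PySem.Dict.keys, h.1, Function.comp]

lemma pvInv_step (d : PySem.Dict String (List (String × String)))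
    (g : PySem.Dict String (List (List (String × String))))
    (r : List (String × String)) (h : pvInv d g) :
    pvInv (if d.contains (pvName r) = false ∨ pvScore r > pvScore (d.getD (pvName r) [])
           then d.insert (pvName r) r else d)
          (g.modify (pvName r) [] (· ++ [r])) := by
  obtain ⟨hitems, hnd, hne⟩ := h
  have hkeys : d.keys = g.keys := pvInv_keys ⟨hitems, hnd, hne⟩
  have hcont : d.contains (pvName r) = g.contains (pvName r) := by
    simp [PySem.Dict.contains_eq_decide_mem_keys, hkeys]
  rcases hc : g.contains (pvName r) with _ | _
  · -- fresh brand: both dicts append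
    have hgD : g.getD (pvName r) [] = [] := PySem.Dict.getD_of_not_contains _ _ hc
    have hdne : d.contains (pvName r) = false := by rw [hcont, hc]
    rw [PySem.Dict.modify, hgD]
    rw [if_pos (Or.inl hdne)]
    have hnotin : pvName r ∉ g.keys := by
      intro hmem
      have := (PySem.Dict.contains_iff_mem_keys g (pvName r)).2 hmem
      rw [hc] at this; cases this
    refine ⟨?_, ?_, ?_⟩
    · rw [PySem.Dict.items_insert_of_not_contains _ _ hdne,
        PySem.Dict.items_insert_of_not_contains _ _ hc, List.map_append, hitems]
      rfl
    · rw [PySem.Dict.keys_insert_of_not_contains _ _ hc]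
      simp only [List.nodup_append, List.nodup_cons, List.nodup_nil]
      exact ⟨hnd, by simp, by intro a ha b hb; rw [List.mem_singleton] at hb; subst hb; exact fun he => hnotin (he ▸ ha)⟩
    · intro p hp
      rw [PySem.Dict.items_insert_of_not_contains _ _ hc] at hp
      rcases List.mem_append.1 hp with h1 | h1
      · exact hne p h1
      · simp at h1; simp [h1]
  · -- existing brand: A may replace its best row, B appends to the group
    obtain ⟨rows, hrows⟩ : ∃ rows, g.get? (pvName r) = some rows := by
      have := PySem.Dict.contains_eq_isSome_get? g (pvName r)
      rw [hc] at this
      rcases h' : g.get? (pvName r) with _ | rows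
      · rw [h'] at this; simp at this
      · exact ⟨rows, rfl⟩
    have hmemg : (pvName r, rows) ∈ g.items := PySem.Dict.mem_items_of_get?_eq_some _ hrows
    have hrne : rows ≠ [] := hne _ hmemg
    have hgD : g.getD (pvName r) [] = rows := PySem.Dict.getD_of_get?_eq_some _ _ hrows
    have hdD : d.getD (pvName r) [] = pvPick rows := by
      have hmemd : (pvName r, pvPick rows) ∈ d.items := by
        rw [hitems]; exact List.mem_map.2 ⟨_, hmemg, rfl⟩
      have hdnd : d.keys.Nodup := by rw [hkeys]; exact hnd
      exact PySem.Dict.getD_of_mem_items _ hmemd hdnd []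
    have hdc : d.contains (pvName r) = true := by rw [hcont, hc]
    have huniq : ∀ p ∈ g.items, p.1 = pvName r → p = (pvName r, rows) := by
      intro p hp hp1
      have : g.get? p.1 = some p.2 := PySem.Dict.get?_of_mem_items _ hp hnd
      rw [hp1, hrows] at this
      cases p; simp at hp1 this; simp [hp1, this]
    rw [PySem.Dict.modify, hgD]
    have hgitems := PySem.Dict.items_insert_of_contains g (rows ++ [r]) hc
    have hkeep : (g.insert (pvName r) (rows ++ [r])).keys.Nodup := by
      rw [PySem.Dict.keys_insert_of_contains _ _ hc]; exact hnd
    have hne' : ∀ p ∈ (g.insert (pvName r) (rows ++ [r])).items, p.2 ≠ [] := by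
      intro p hp
      rw [hgitems] at hp
      obtain ⟨q, hq, hqe⟩ := List.mem_map.1 hp
      by_cases hqk : q.1 = pvName r
      · rw [if_pos (by simp [hqk])] at hqe
        subst hqe; simp
      · rw [if_neg (by simp [hqk])] at hqe
        subst hqe; exact hne q hq
    by_cases hlt : pvScore (d.getD (pvName r) []) < pvScore r
    · -- A replaces
      rw [if_pos (Or.inr hlt)]
      have hpick : pvPick (rows ++ [r]) = r := by
        rw [pvPick_append_singleton rows hrne r, if_pos (hdD ▸ hlt)]
      refine ⟨?_, hkeep, hne'⟩
      rw [PySem.Dict.items_insert_of_contains d r hdc, hgitems, hitems]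
      rw [List.map_map, List.map_map]
      apply List.map_congr_left
      intro p hp
      by_cases hpk : p.1 = pvName r
      · have := huniq p hp hpk
        subst this
        simp [hpick]
      · simp [hpk, Function.comp, beq_iff_eq]
    · -- A keeps its current best row
      rw [if_neg (fun hor => hor.elim (fun h' => by rw [hdc] at h'; cases h') (fun h' => hlt h'))]
      have hpick : pvPick (rows ++ [r]) = pvPick rows := by
        rw [pvPick_append_singleton rows hrne r, if_neg (hdD ▸ hlt)]
      refine ⟨?_, hkeep, hne'⟩
      rw [hgitems, hitems, List.map_map]
      apply List.map_congr_left
      intro p hp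
      by_cases hpk : p.1 = pvName r
      · have := huniq p hp hpk
        subst this
        simp [hpick]
      · simp [hpk, Function.comp, beq_iff_eq]

lemma pvInv_fold (results : List (List (String × String)))
    (d : PySem.Dict String (List (String × String)))
    (g : PySem.Dict String (List (List (String × String)))) (h : pvInv d g) :
    pvInv
      (results.foldl
        (fun d r =>
          let name := pvName r
          if name = "" then d
          else if d.contains name = false ∨ pvScore r > pvScore (d.getD name []) then d.insert name r
          else d) d)
      (results.foldl
        (fun g r =>
          let name := pvName r
          if name = "" then g else g.modify name [] (· ++ [r])) g) := by
  induction results generalizing d g with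
  | nil => exact h
  | cons r rest ih =>
    simp only [List.foldl_cons]
    by_cases hname : pvName r = ""
    · simp only [hname, if_pos]
      exact ih d g h
    · simp only [if_neg hname]
      exact ih _ _ (pvInv_step d g r h)

-- ===== VERDICT (by name: the statement is the Claim_ definition above) =====
theorem dedupe_by_brand_spec : Claim_equal_dedupe_by_brand := by
  intro results _ _
  unfold Spec_dedupe_by_brand dedupe_by_brand dedupe_by_brand_alt
  have h := pvInv_fold results PySem.Dict.empty PySem.Dict.empty
    (by refine ⟨rfl, ?_, ?_⟩ <;> simp [PySem.Dict.empty, PySem.Dict.keys])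
  simp only [PySem.Dict.values, h.1, List.map_map]
  rfl
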